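-- pv_equiv track=rewrite | github.com/derek-dkliu/pydsa | bits/pairwise_swap.py | pairwise_swap1
-- ===== SOURCE A (Python) =====
-- def pairwise_swap1(n):
--     mask = 0b11
--     count = 0
--     c = n
--     while c != 0:
--         if c & mask == 1 or c & mask == 2:
--             n ^= mask << count
--         c = rshift(c, 2)
--         count += 2
--     return n
--
-- def rshift(a, b):
--     return (a % 0x100000000) >> b
-- ===== SOURCE B (Python) =====
-- def pairwise_swap1(n):
--     low = n & 0xFFFFFFFF
--     swapped = ((low & 0xAAAAAAAA) >> 1) | ((low & 0x55555555) << 1)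
--     return (n & ~0xFFFFFFFF) | swapped
-- ===== Notes on version B (the rewrite author's own statement) =====
-- stated objective: idiomatic
-- what changed: Replaced A's pair-by-pair scanning loop (conditional XOR per bit pair, driven by a masked right shift) with the classic closed-form mask swap: one bitwise expression ((low & 0xAAAAAAAA) >> 1) | ((low & 0x55555555) << 1) on low = n & 0xFFFFFFFF, with the bits above the low 32 preserved via n & ~0xFFFFFFFF.
import Mathlib
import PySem

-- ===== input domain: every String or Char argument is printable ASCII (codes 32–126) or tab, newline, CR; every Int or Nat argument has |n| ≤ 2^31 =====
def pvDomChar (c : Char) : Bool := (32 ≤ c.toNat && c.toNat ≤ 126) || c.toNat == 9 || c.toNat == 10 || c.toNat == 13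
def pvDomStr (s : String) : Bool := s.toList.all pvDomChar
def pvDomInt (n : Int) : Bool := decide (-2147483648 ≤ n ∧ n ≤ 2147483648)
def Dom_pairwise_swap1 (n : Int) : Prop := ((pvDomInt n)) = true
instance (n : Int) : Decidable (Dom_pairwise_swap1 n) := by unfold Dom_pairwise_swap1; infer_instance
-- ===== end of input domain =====

-- B replaces A's pair-by-pair scanning loop with the classic closed-form mask swap of adjacent bit pairs (objective: idiomatic).

-- ===== PORT A =====
-- helper rshift from the Python module
def pv_rshift (a b : Int) : Int := (PySem.Int.mod a 4294967296) >>> b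

-- the while loop; the fuel argument only makes termination syntactic and is never exhausted:
-- after the first rshift c is a natural number below 2^30 that is quartered each turn,
-- so the fuel of 18 always outlasts the Python loop.
def pairwise_swap1_go (fuel : Nat) (n c count : Int) : Int :=
  match fuel with
  | 0 => n
  | fuel + 1 =>
    if c ≠ 0 then
      let n' := if c.land 3 = 1 ∨ c.land 3 = 2 then n.xor ((3 : Int) <<< count) else n
      pairwise_swap1_go fuel n' (pv_rshift c 2) (count + 2)
    else n

def pairwise_swap1 (n : Int) : Int := pairwise_swap1_go 18 n n 0

-- ===== PORT B =====
def pairwise_swap1_alt (n : Int) : Int :=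
  let low := Int.land n 4294967295
  let swapped := Int.lor ((Int.land low 2863311530) >>> (1 : Int)) ((Int.land low 1431655765) <<< (1 : Int))
  Int.lor (Int.land n (Int.lnot 4294967295)) swapped

-- ===== PRECONDITION & SPEC =====
def Spec_pairwise_swap1 (n : Int) (out : Int) : Prop := out = pairwise_swap1_alt n
instance (n : Int) (out : Int) : Decidable (Spec_pairwise_swap1 n out) := by unfold Spec_pairwise_swap1; infer_instance

-- ===== CLAIM (what is proved, stated in full; the proofs are below) =====
def Claim_equal_pairwise_swap1 : Prop := ∀ (n : Int), Dom_pairwise_swap1 n → Spec_pairwise_swap1 n (pairwise_swap1 n)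

-- ===== LEMMAS AND PROOFS =====

-- the pair partner of a bit index: 0↔1, 2↔3, …
def pvPartner (i : ℕ) : ℕ := if i % 2 = 0 then i + 1 else i - 1

-- the XOR adjustment A's loop applies for the lowest pair of c / accumulated over all pairs of c
def pvAdj (c : ℕ) : ℕ := if c % 4 = 1 ∨ c % 4 = 2 then 3 else 0

def pvDiff (c : ℕ) : ℕ :=
  if h : c = 0 then 0 else pvAdj c ^^^ (pvDiff (c / 4)) <<< 2
  termination_by c
  decreasing_by exact Nat.div_lt_self (Nat.pos_of_ne_zero h) (by omega)

lemma pv_xor_zero (n : Int) : Int.xor n 0 = n := by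
  cases n <;> simp [Int.xor]

lemma pv_xor_xor_nat (n : Int) (a b : ℕ) :
    Int.xor (Int.xor n (a : Int)) (b : Int) = Int.xor n ((a ^^^ b : ℕ) : Int) := by
  cases n with
  | ofNat m => simp [Int.xor, Nat.xor_assoc]
  | negSucc m => simp [Int.xor, Nat.xor_assoc]

lemma pv_shiftLeft_xor (a b k : ℕ) : (a ^^^ b) <<< k = (a <<< k) ^^^ (b <<< k) := by
  apply Nat.eq_of_testBit_eq; intro i
  simp [Nat.testBit_shiftLeft, Nat.testBit_xor, Bool.and_xor_distrib_left]

lemma pv_land3_natCast (c : ℕ) : Int.land (c : Int) 3 = ((c &&& 3 : ℕ) : Int) := rfl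

lemma pv_rshift_natCast (c : ℕ) (hc : c < 2 ^ 32) : pv_rshift (c : Int) 2 = ((c / 4 : ℕ) : Int) := by
  unfold pv_rshift
  rw [PySem.Int.mod_eq_emod_of_pos (by norm_num)]
  rw [Int.emod_eq_of_lt (by positivity) (by exact_mod_cast hc)]
  rw [show (2 : Int) = ((2:ℕ) : Int) by norm_num, Int.shiftRight_natCast]
  norm_num [Nat.shiftRight_eq_div_pow]

lemma pv_go_spec (fuel : ℕ) : ∀ (c : ℕ) (n : Int) (k : ℕ), c < 2 ^ 32 → c < 4 ^ fuel →
    pairwise_swap1_go fuel n (c : Int) (k : Int) = Int.xor n ((pvDiff c <<< k : ℕ) : Int) := by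
  induction fuel with
  | zero =>
    intro c n k h32 h0
    have : c = 0 := by simpa using h0
    subst this
    simp [pairwise_swap1_go, pvDiff, pv_xor_zero]
  | succ fuel ih =>
    intro c n k h32 hf
    by_cases hc : c = 0
    · subst hc
      simp [pairwise_swap1_go, pvDiff]
      exact (pv_xor_zero n).symm
    · have hcz : ((c : Int) ≠ 0) := by exact_mod_cast hc
      rw [pairwise_swap1_go]
      simp only [hcz, if_true, ne_eq, not_false_iff]
      rw [pv_land3_natCast, pv_rshift_natCast c h32]
      have hmod : c &&& 3 = c % 4 := by
        rw [show (3:ℕ) = 2^2 - 1 by norm_num, Nat.and_two_pow_sub_one_eq_mod]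
      have hk2 : ((k : Int) + 2) = ((k + 2 : ℕ) : Int) := by push_cast; ring
      have hdiv32 : c / 4 < 2 ^ 32 := by omega
      have hdivf : c / 4 < 4 ^ fuel := by
        have : c < 4 ^ (fuel + 1) := hf
        have : 4 ^ (fuel + 1) = 4 * 4 ^ fuel := by ring
        omega
      have hsh3 : ((3 : Int) <<< ((k : ℕ) : Int)) = ((3 <<< k : ℕ) : Int) := by
        exact_mod_cast Int.shiftLeft_natCast 3 k
      have hkey : pvDiff c <<< k = (pvAdj c <<< k) ^^^ (pvDiff (c / 4) <<< (k + 2)) := by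
        conv_lhs => rw [pvDiff]
        simp only [hc, dite_false]
        rw [pv_shiftLeft_xor, show k + 2 = 2 + k by omega, Nat.shiftLeft_add]
      by_cases hcond : c &&& 3 = 1 ∨ c &&& 3 = 2
      · have hcondI : ((c &&& 3 : ℕ) : Int) = 1 ∨ ((c &&& 3 : ℕ) : Int) = 2 := by
          rcases hcond with h | h <;> [left; right] <;> exact_mod_cast h
        have hadj : pvAdj c = 3 := by unfold pvAdj; rw [← hmod]; simp [hcond]
        simp only [hcondI, if_pos, hk2]
        rw [hsh3, ih (c / 4) _ (k + 2) hdiv32 hdivf, pv_xor_xor_nat, hkey, hadj]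
      · have hadj : pvAdj c = 0 := by unfold pvAdj; rw [← hmod]; simp [hcond]
        have hcondI : ¬(((c &&& 3 : ℕ) : Int) = 1 ∨ ((c &&& 3 : ℕ) : Int) = 2) := by
          intro h
          rcases h with h | h
          · exact hcond (Or.inl (by exact_mod_cast h))
          · exact hcond (Or.inr (by exact_mod_cast h))
        simp only [hcondI, if_false]
        rw [hk2, ih (c / 4) _ (k + 2) hdiv32 hdivf]
        rw [hkey, hadj]
        simp

lemma pv_3_testBit (j : ℕ) : (3 : ℕ).testBit j = decide (j < 2) := by
  rw [show (3:ℕ) = 2^2 - 1 by norm_num, Nat.testBit_two_pow_sub_one]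

theorem pv_compl (k : ℕ) : ∀ m, m < 2 ^ k → (2 ^ k - 1) ^^^ m = 2 ^ k - 1 - m := by
  induction k with
  | zero => intro m hm; interval_cases m; rfl
  | succ k ih =>
    intro m hm
    have h2 : m / 2 < 2 ^ k := by omega
    have hIH := ih (m / 2) h2
    have hx : (2 ^ (k + 1) - 1) ^^^ m = 2 * (((2 ^ (k + 1) - 1) ^^^ m) / 2) + ((2 ^ (k + 1) - 1) ^^^ m) % 2 := by omega
    have hdiv : ((2 ^ (k + 1) - 1) ^^^ m) / 2 = (2 ^ k - 1) ^^^ (m / 2) := by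
      rw [Nat.xor_div_two]; congr 1; omega
    have hmod : ((2 ^ (k + 1) - 1) ^^^ m) % 2 = ((2 ^ (k + 1) - 1) + m) % 2 := Nat.xor_mod_two_eq
    have hp : 0 < 2 ^ (k+1) := Nat.two_pow_pos _
    have hp2 : 2 ^ (k+1) = 2 * 2 ^ k := by ring
    omega

lemma pv_start (n : Int) (hdom : -2147483648 ≤ n ∧ n ≤ 2147483648) :
    pairwise_swap1_go 18 n n 0 = Int.xor n (((pvDiff (n % 4294967296).toNat : ℕ) : Int)) := by
  have hL : (((n % 4294967296).toNat : ℕ) : ℤ) = n % 4294967296 :=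
    Int.toNat_of_nonneg (Int.emod_nonneg _ (by norm_num))
  set L := (n % 4294967296).toNat with hLdef
  by_cases hn : n = 0
  · subst hn
    have : L = 0 := by omega
    rw [this]
    simp [pairwise_swap1_go, pvDiff, pv_xor_zero]
  · have hLb : L < 2 ^ 32 := by omega
    have hLnz : L ≠ 0 := by omega
    have hland : n.land 3 = ((L &&& 3 : ℕ) : ℤ) := by
      cases n with
      | ofNat a =>
        simp only [Int.ofNat_eq_natCast] at hL hLdef hLb hLnz hn hdom
        have hLa : L = a % 4294967296 := by
          have : ((a : ℤ)) % 4294967296 = ((a % 4294967296 : ℕ) : ℤ) := by push_cast; ring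
          omega
        show Int.ofNat (a &&& 3) = ((L &&& 3 : ℕ) : ℤ)
        have h1 : a &&& 3 = a % 4 := by
          rw [show (3:ℕ) = 2^2 - 1 by norm_num, Nat.and_two_pow_sub_one_eq_mod]
        have h2 : L &&& 3 = L % 4 := by
          rw [show (3:ℕ) = 2^2 - 1 by norm_num, Nat.and_two_pow_sub_one_eq_mod]
        have : a % 4 = L % 4 := by omega
        simp [h1, h2, this]
      | negSucc m =>
        have hm : m < 2 ^ 32 := by
          have := Int.negSucc_eq m
          omega
        have hLm : L = 4294967295 - m := by
          have := Int.negSucc_eq m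
          omega
        show Int.ofNat (Nat.ldiff 3 m) = ((L &&& 3 : ℕ) : ℤ)
        have key : Nat.ldiff 3 m = L &&& 3 := by
          have : L = (2^32 - 1) ^^^ m := by rw [pv_compl 32 m hm]; omega
          rw [this]
          apply Nat.eq_of_testBit_eq
          intro j
          rw [Nat.testBit_ldiff, Nat.testBit_and, Nat.testBit_xor, pv_3_testBit,
            Nat.testBit_two_pow_sub_one]
          by_cases hj : j < 2
          · simp [hj, show j < 32 by omega]
          · simp [hj]
        simp [key]
    have hrsh : pv_rshift n 2 = ((L / 4 : ℕ) : ℤ) := by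
      unfold pv_rshift
      rw [PySem.Int.mod_eq_emod_of_pos (by norm_num), ← hL,
        show (2 : Int) = ((2:ℕ) : Int) by norm_num, Int.shiftRight_natCast]
      norm_num [Nat.shiftRight_eq_div_pow]
    rw [show (18:ℕ) = 17 + 1 from rfl, pairwise_swap1_go]
    simp only [hn, if_true, ne_eq, not_false_iff, hland, hrsh]
    have hdiv32 : L / 4 < 2 ^ 32 := by omega
    have hdivf : L / 4 < 4 ^ 17 := by
      have : (4:ℕ) ^ 17 = 2 ^ 34 := by norm_num
      omega
    have hmodn : L &&& 3 = L % 4 := by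
      rw [show (3:ℕ) = 2^2 - 1 by norm_num, Nat.and_two_pow_sub_one_eq_mod]
    have hc2 : ((0 : ℤ) + 2) = (((2:ℕ) : ℕ) : ℤ) := by norm_num
    have hkey : pvDiff L = (pvAdj L) ^^^ (pvDiff (L / 4) <<< 2) := by
      conv_lhs => rw [pvDiff]
      simp only [hLnz, dite_false]
    by_cases hcond : L &&& 3 = 1 ∨ L &&& 3 = 2
    · have hcondI : ((L &&& 3 : ℕ) : Int) = 1 ∨ ((L &&& 3 : ℕ) : Int) = 2 := by
        rcases hcond with h | h <;> [left; right] <;> exact_mod_cast h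
      have hadj : pvAdj L = 3 := by unfold pvAdj; rw [← hmodn]; simp [hcond]
      simp only [hcondI, if_pos, hc2]
      rw [pv_go_spec 17 (L / 4) _ 2 hdiv32 hdivf,
        show ((3:ℤ) <<< (0:ℤ)) = ((3 : ℕ) : ℤ) from rfl, pv_xor_xor_nat, hkey, hadj]
    · have hcondI : ¬(((L &&& 3 : ℕ) : Int) = 1 ∨ ((L &&& 3 : ℕ) : Int) = 2) := by
        intro h
        rcases h with h | h
        · exact hcond (Or.inl (by exact_mod_cast h))
        · exact hcond (Or.inr (by exact_mod_cast h))
      have hadj : pvAdj L = 0 := by unfold pvAdj; rw [← hmodn]; simp [hcond]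
      simp only [hcondI, if_false, hc2]
      rw [pv_go_spec 17 (L / 4) _ 2 hdiv32 hdivf, hkey, hadj]
      simp


lemma pv_maskA_testBit (i : ℕ) : (2863311530 : ℕ).testBit i = (decide (i < 32) && decide (i % 2 = 1)) := by
  by_cases h : i < 32
  · have hs : ∀ j < 32, (2863311530 : ℕ).testBit j = decide (j % 2 = 1) := by decide
    simp [hs i h, h]
  · have hlt : (2863311530 : ℕ) < 2 ^ i :=
      lt_of_lt_of_le (show (2863311530:ℕ) < 2^32 by norm_num) (Nat.pow_le_pow_right (by omega) (by omega))
    simp [Nat.testBit_eq_false_of_lt hlt, h]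

lemma pv_maskF_testBit (i : ℕ) : (1431655765 : ℕ).testBit i = (decide (i < 32) && decide (i % 2 = 0)) := by
  by_cases h : i < 32
  · have hs : ∀ j < 32, (1431655765 : ℕ).testBit j = decide (j % 2 = 0) := by decide
    simp [hs i h, h]
  · have hlt : (1431655765 : ℕ) < 2 ^ i :=
      lt_of_lt_of_le (show (1431655765:ℕ) < 2^32 by norm_num) (Nat.pow_le_pow_right (by omega) (by omega))
    simp [Nat.testBit_eq_false_of_lt hlt, h]

lemma pv_swap_testBit (c j : ℕ) :
    (((c &&& 2863311530) >>> 1) ||| ((c &&& 1431655765) <<< 1)).testBit j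
      = (decide (j < 32) && c.testBit (pvPartner j)) := by
  rw [Nat.testBit_or, Nat.testBit_shiftRight, Nat.testBit_shiftLeft,
    Nat.testBit_and, Nat.testBit_and, pv_maskA_testBit, pv_maskF_testBit]
  unfold pvPartner
  by_cases h2 : j % 2 = 0
  · by_cases h0 : j = 0
    · subst h0; simp
    · by_cases h32 : j < 32
      · rw [Nat.add_comm 1 j]
        simp [h2, h32, show (j+1) % 2 = 1 by omega, show j+1 < 32 by omega,
          show ¬((j-1) % 2 = 0) by omega]
      · simp [h2, h32, show ¬(1+j < 32) by omega, show ¬((j-1) % 2 = 0) by omega]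
  · by_cases h32 : j < 32
    · simp [h2, h32, show ¬((1+j) % 2 = 1) by omega, show (j-1) % 2 = 0 by omega,
        show j - 1 < 32 by omega, show 1 ≤ j by omega]
    · simp [h2, h32, show ¬((1+j) % 2 = 1) by omega, show ¬(j-1 < 32) by omega]

lemma pv_partner_ge (j : ℕ) (h : 32 ≤ j) : 32 ≤ pvPartner j := by
  unfold pvPartner; split <;> omega

lemma pv_diff_testBit (c : ℕ) : ∀ i, (pvDiff c).testBit i = ((c.testBit i) != c.testBit (pvPartner i)) := by
  induction c using Nat.strong_induction_on with
  | _ c ih =>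
    intro i
    by_cases hc : c = 0
    · subst hc; simp [pvDiff, pvPartner]
    rw [pvDiff]; simp only [hc, dite_false]
    rw [Nat.testBit_xor, Nat.testBit_shiftLeft]
    by_cases hi : i < 2
    · have hsh : (decide (i ≥ 2) && (pvDiff (c / 4)).testBit (i - 2)) = false := by
        simp; omega
      rw [hsh, Bool.xor_false]
      have h0 : (c % 4).testBit 0 = c.testBit 0 := by
        rw [show (4:ℕ) = 2^2 from rfl, Nat.testBit_mod_two_pow]; simp
      have h1 : (c % 4).testBit 1 = c.testBit 1 := by
        rw [show (4:ℕ) = 2^2 from rfl, Nat.testBit_mod_two_pow]; simp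
      have h4 : c % 4 < 4 := by omega
      interval_cases i
      · rw [show pvPartner 0 = 1 from rfl, ← h0, ← h1]
        interval_cases h : (c % 4) <;> simp [pvAdj, h] <;> decide
      · rw [show pvPartner 1 = 0 from rfl, ← h0, ← h1]
        interval_cases h : (c % 4) <;> simp [pvAdj, h] <;> decide
    · have hge : i ≥ 2 := by omega
      have hadj : (pvAdj c).testBit i = false := by
        apply Nat.testBit_eq_false_of_lt
        calc pvAdj c < 4 := by unfold pvAdj; split <;> omega
        _ = 2 ^ 2 := by norm_num
        _ ≤ 2 ^ i := Nat.pow_le_pow_right (by omega) hge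
      rw [hadj]
      have ihv := ih (c / 4) (Nat.div_lt_self (Nat.pos_of_ne_zero hc) (by omega)) (i - 2)
      have hdb : ∀ j, (c / 4).testBit j = c.testBit (j + 2) := by
        intro j
        rw [show c / 4 = c / 2^2 by norm_num, Nat.testBit_div_two_pow]
      have hpp : pvPartner (i - 2) + 2 = pvPartner i := by
        unfold pvPartner
        by_cases hp : i % 2 = 0
        · simp [hp, show (i-2) % 2 = 0 by omega]; omega
        · simp [hp, show ¬((i-2) % 2 = 0) by omega]; omega
      rw [show (decide (i ≥ 2)) = true by simp [hge], Bool.true_and, ihv, hdb, hdb,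
        show i - 2 + 2 = i by omega, hpp, Bool.false_xor]

set_option maxRecDepth 10000 in
lemma pv_final (n : Int) (hdom : -2147483648 ≤ n ∧ n ≤ 2147483648) :
    Int.xor n (((pvDiff (n % 4294967296).toNat : ℕ) : Int)) = pairwise_swap1_alt n := by
  cases n with
  | ofNat a =>
    have ha : a < 2 ^ 32 := by
      have : (Int.ofNat a) ≤ 2147483648 := hdom.2
      simp only [Int.ofNat_eq_natCast] at this
      omega
    have hL : ((Int.ofNat a) % 4294967296).toNat = a := by
      simp only [Int.ofNat_eq_natCast]
      omega
    rw [hL]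
    show Int.ofNat (a ^^^ pvDiff a) = _
    unfold pairwise_swap1_alt
    show _ = Int.lor (Int.ofNat (a.ldiff 4294967295))
      (Int.ofNat (((a &&& 4294967295) &&& 2863311530) >>> 1 ||| ((a &&& 4294967295) &&& 1431655765) <<< 1))
    have hld : a.ldiff 4294967295 = 0 := by
      apply Nat.eq_of_testBit_eq
      intro j
      rw [Nat.testBit_ldiff, show (4294967295:ℕ) = 2^32 - 1 by norm_num, Nat.testBit_two_pow_sub_one]
      by_cases hj : j < 32
      · simp [hj]
      · have haj : a.testBit j = false :=
          Nat.testBit_eq_false_of_lt (lt_of_lt_of_le ha (Nat.pow_le_pow_right (by omega) (show 32 ≤ j by omega)))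
        simp [hj, haj]
    have haM : a &&& 4294967295 = a := by
      rw [show (4294967295:ℕ) = 2^32 - 1 by norm_num, Nat.and_two_pow_sub_one_eq_mod]
      omega
    rw [hld, haM]
    show Int.ofNat _ = Int.ofNat (0 ||| _)
    rw [Nat.zero_or]
    refine congrArg Int.ofNat ?_
    apply Nat.eq_of_testBit_eq
    intro j
    rw [Nat.testBit_xor, pv_diff_testBit, pv_swap_testBit]
    by_cases hj : j < 32
    · simp [hj]
    · have hp : a.testBit (pvPartner j) = false :=
        Nat.testBit_eq_false_of_lt (lt_of_lt_of_le ha (Nat.pow_le_pow_right (by omega) (pv_partner_ge j (by omega))))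
      have haj : a.testBit j = false :=
        Nat.testBit_eq_false_of_lt (lt_of_lt_of_le ha (Nat.pow_le_pow_right (by omega) (show 32 ≤ j by omega)))
      simp [hj, hp, haj]
  | negSucc m =>
    have hm : m < 2 ^ 32 := by
      have := Int.negSucc_eq m
      have := hdom.1
      omega
    have hL : ((Int.negSucc m) % 4294967296).toNat = (2^32 - 1) ^^^ m := by
      rw [pv_compl 32 m hm]
      have := Int.negSucc_eq m
      omega
    rw [hL]
    set Lc := (2^32 - 1) ^^^ m with hLc
    have hLcb : ∀ j, Lc.testBit j = (decide (j < 32) != m.testBit j) := by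
      intro j
      rw [hLc, Nat.testBit_xor, Nat.testBit_two_pow_sub_one]
    have hmhigh : ∀ j, 32 ≤ j → m.testBit j = false := fun j hj =>
      Nat.testBit_eq_false_of_lt (lt_of_lt_of_le hm (Nat.pow_le_pow_right (by omega) hj))
    show Int.negSucc (m ^^^ pvDiff Lc) = _
    unfold pairwise_swap1_alt
    show _ = Int.lor (Int.negSucc (m ||| 4294967295))
      (Int.ofNat (((Nat.ldiff 4294967295 m) &&& 2863311530) >>> 1 ||| ((Nat.ldiff 4294967295 m) &&& 1431655765) <<< 1))
    have hld : Nat.ldiff 4294967295 m = Lc := by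
      apply Nat.eq_of_testBit_eq
      intro j
      rw [Nat.testBit_ldiff, hLcb, show (4294967295:ℕ) = 2^32 - 1 by norm_num, Nat.testBit_two_pow_sub_one]
      by_cases hj : j < 32
      · simp [hj]
      · simp [hj, hmhigh j (by omega)]
    rw [hld]
    show _ = Int.negSucc ((m ||| 4294967295).ldiff _)
    refine congrArg Int.negSucc ?_
    apply Nat.eq_of_testBit_eq
    intro j
    rw [Nat.testBit_xor, pv_diff_testBit, Nat.testBit_ldiff, Nat.testBit_or, pv_swap_testBit,
      hLcb, hLcb, show (4294967295:ℕ) = 2^32 - 1 by norm_num, Nat.testBit_two_pow_sub_one]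
    by_cases hj : j < 32
    · have hpj : pvPartner j < 32 := by unfold pvPartner; split <;> omega
      simp [hj, hpj]
    · have hpj : ¬(pvPartner j < 32) := by have := pv_partner_ge j (by omega); omega
      simp [hj, hpj, hmhigh j (by omega), hmhigh (pvPartner j) (by have := pv_partner_ge j (by omega); omega)]

-- ===== VERDICT (by name: the statement is the Claim_ definition above) =====
theorem pairwise_swap1_spec : Claim_equal_pairwise_swap1 := by
  intro n hd
  unfold Spec_pairwise_swap1
  have hdom : -2147483648 ≤ n ∧ n ≤ 2147483648 := by
    simpa [Dom_pairwise_swap1, pvDomInt] using hd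
  rw [show pairwise_swap1 n = pairwise_swap1_go 18 n n 0 from rfl, pv_start n hdom, pv_final n hdom]
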